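-- pv_equiv track=rewrite | github.com/sunyikang/skilltraining | python/exam_virtuos/duplicate_2.py | internal
-- ===== SOURCE A (Python) =====
-- def internal(table):
--     nummax = 0
--     numset = set()
--
--     for element in table:
--         if element not in numset:
--             numset.add(element)
--
--         nummax = element if element > nummax else nummax
--
--     for i in range(0, nummax+1):
--         if i not in numset:
--             return False
--
--     return True
-- ===== SOURCE B (Python) =====
-- def internal(table):
--     numset = set(table)
--     nummax = max([0] + table)
--     return sum(1 for x in numset if 0 <= x <= nummax) == nummax + 1
-- ===== Notes on version B (the rewrite author's own statement) =====
-- stated objective: simpler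
-- what changed: Replaces the per-element coverage scan over range(0, max+1) by a closed-form counting check: the number of distinct values in [0, max] equals max+1 iff all of 0..max are present.
import Mathlib
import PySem

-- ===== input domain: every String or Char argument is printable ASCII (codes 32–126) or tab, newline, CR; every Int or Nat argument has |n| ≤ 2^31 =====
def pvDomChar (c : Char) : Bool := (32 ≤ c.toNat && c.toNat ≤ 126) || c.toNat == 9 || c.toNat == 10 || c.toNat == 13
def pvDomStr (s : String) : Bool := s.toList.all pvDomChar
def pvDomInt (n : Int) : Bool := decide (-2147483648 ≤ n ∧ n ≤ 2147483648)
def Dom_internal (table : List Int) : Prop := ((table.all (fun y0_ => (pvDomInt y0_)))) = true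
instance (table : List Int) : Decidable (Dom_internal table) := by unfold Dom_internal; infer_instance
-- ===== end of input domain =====

-- B replaces A's per-element scan over range(0, max+1) by a closed-form count of the
-- distinct values lying in [0, max]; same return value, different algorithm.

-- ===== PORT A =====
-- the second loop of A: 'for i in range(i0, stop): if i not in numset: return False; return True'
-- (Python's range is lazy and the loop exits at the first missing i, so it is ported as an
-- early-exit recursion over the same indices, not a materialized list)
def internalScan (numset : PySem.Set Int) (i stop : Int) : Bool :=
  if h : i < stop then
    if PySem.Set.contains numset i then internalScan numset (i + 1) stop else false
  else true
termination_by (stop - i).toNat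
decreasing_by simp_wf; omega

def internal (table : List Int) : Bool :=
  -- nummax = 0; numset = set(); for element in table: if-not-in add; nummax update
  let st := table.foldl
    (fun (s : PySem.Set Int × Int) element =>
      ((if PySem.Set.contains s.1 element then s.1 else PySem.Set.add s.1 element),
       (if element > s.2 then element else s.2)))
    (PySem.Set.empty, 0)
  -- for i in range(0, nummax+1): if i not in numset: return False;  return True
  internalScan st.1 0 (st.2 + 1)

-- ===== PORT B =====
def internal_alt (table : List Int) : Bool :=
  let numset := PySem.Set.ofList table
  -- max([0] + table): nonempty, so maxD's default is never used
  let nummax := PySem.List.maxD ((0 : Int) :: table) (fun x => x) 0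
  decide (((numset.filter (fun x => decide (0 ≤ x) && decide (x ≤ nummax))).length : Int)
            = nummax + 1)

-- ===== PRECONDITION & SPEC =====
def Spec_internal (table : List Int) (out : Bool) : Prop := out = internal_alt table
instance (table : List Int) (out : Bool) : Decidable (Spec_internal table out) := by unfold Spec_internal; infer_instance

-- ===== CLAIM (what is proved, stated in full; the proofs are below) =====
def Claim_equal_internal : Prop := ∀ (table : List Int), Dom_internal table → Spec_internal table (internal table)

-- ===== LEMMAS AND PROOFS =====

-- the guarded add of A's loop is exactly PySem.Set.add
lemma pvAdd_guard (s : PySem.Set Int) (x : Int) :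
    (if PySem.Set.contains s x then s else PySem.Set.add s x) = PySem.Set.add s x := by
  simp only [PySem.Set.add]
  split <;> simp_all

-- max([0] + table) threads Option through max?; it equals A's bare Int fold
lemma pvMaxD_eq (xs : List Int) :
    PySem.List.maxD ((0 : Int) :: xs) (fun x => x) 0
      = xs.foldl (fun nm e => if e > nm then e else nm) 0 := by
  suffices h : ∀ (ys : List Int) (a : Int),
      (PySem.List.max? (a :: ys) (fun x => x)).getD 0
        = ys.foldl (fun nm e => if e > nm then e else nm) a from h xs 0
  intro ys
  induction ys with
  | nil => intro a; rfl
  | cons y t ih =>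
    intro a
    have h1 : PySem.List.max? (a :: y :: t) (fun x => x)
        = PySem.List.max? ((if a < y then y else a) :: t) (fun x => x) := by
      simp only [PySem.List.max?, List.foldl_cons]
      split <;> rfl
    rw [h1, ih]
    simp only [List.foldl_cons, gt_iff_lt]

lemma pvMax_nonneg (xs : List Int) :
    0 ≤ xs.foldl (fun nm e => if e > nm then e else nm) 0 := by
  suffices h : ∀ (a : Int), 0 ≤ a → 0 ≤ xs.foldl (fun nm e => if e > nm then e else nm) a from
    h 0 le_rfl
  induction xs with
  | nil => intro a ha; simpa using ha
  | cons y ys ih =>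
    intro a ha
    simp only [List.foldl_cons]
    apply ih
    split <;> omega

-- the early-exit scan is the 'all' of the range it walks
lemma pvScan_eq_all (s : PySem.Set Int) (a b : Int) :
    internalScan s a b = (PySem.List.pyRange a b 1).all (fun i => PySem.Set.contains s i) := by
  by_cases h : a < b
  · rw [PySem.List.pyRange_one_cons h]
    unfold internalScan
    rw [dif_pos h]
    by_cases hc : PySem.Set.contains s a
    · rw [if_pos hc]
      simp only [List.all_cons, hc, Bool.true_and]
      exact pvScan_eq_all s (a + 1) b
    · rw [if_neg hc]
      have ha : a ∉ s := fun hm => hc ((PySem.Set.contains_iff s a).mpr hm)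
      simp [List.all_cons, ha]
  · rw [PySem.List.pyRange_one_eq_nil (by omega)]
    unfold internalScan
    rw [dif_neg h]
    rfl
termination_by (b - a).toNat
decreasing_by simp_wf; omega

-- the heart: for a duplicate-free list s and 0 ≤ M, "every i in [0,M] is in s"
-- is the same as "the number of elements of s inside [0,M] is M+1"
lemma pvCore (s : List Int) (hnd : s.Nodup) (M : Int) (hM : 0 ≤ M) :
    ((∀ i : Int, 0 ≤ i → i ≤ M → i ∈ s) ↔
      ((s.filter (fun x => decide (0 ≤ x) && decide (x ≤ M))).length : Int) = M + 1) := by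
  set F := s.filter (fun x => decide (0 ≤ x) && decide (x ≤ M)) with hF
  have hFnd : F.Nodup := hnd.filter _
  have hFcard : F.toFinset.card = F.length := List.toFinset_card_of_nodup hFnd
  have hsub : F.toFinset ⊆ Finset.Icc 0 M := by
    intro x hx
    simp only [hF, List.mem_toFinset, List.mem_filter, Bool.and_eq_true, decide_eq_true_eq] at hx
    simp [Finset.mem_Icc, hx.2.1, hx.2.2]
  have hIcc : (Finset.Icc (0:Int) M).card = (M + 1).toNat := by
    rw [Int.card_Icc]; omega
  constructor
  · intro hall
    have heq : F.toFinset = Finset.Icc 0 M := by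
      apply Finset.Subset.antisymm hsub
      intro x hx
      simp only [Finset.mem_Icc] at hx
      simp only [hF, List.mem_toFinset, List.mem_filter, Bool.and_eq_true, decide_eq_true_eq]
      exact ⟨hall x hx.1 hx.2, hx.1, hx.2⟩
    have : F.length = (M + 1).toNat := by rw [← hFcard, heq, hIcc]
    omega
  · intro hlen
    have hcard : F.toFinset.card = (Finset.Icc (0:Int) M).card := by
      rw [hFcard, hIcc]; omega
    have heq : F.toFinset = Finset.Icc 0 M :=
      Finset.eq_of_subset_of_card_le hsub (le_of_eq hcard.symm)
    intro i h0 hi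
    have : i ∈ F.toFinset := by rw [heq]; simp [Finset.mem_Icc, h0, hi]
    simp only [hF, List.mem_toFinset, List.mem_filter] at this
    exact this.1

-- ===== VERDICT (by name: the statement is the Claim_ definition above) =====
theorem internal_spec : Claim_equal_internal := by
  intro table _
  unfold Spec_internal internal internal_alt
  simp only [pvAdd_guard]
  rw [PySem.List.foldl_prod_mk PySem.Set.add (fun nm e => if e > nm then e else nm) table
        PySem.Set.empty 0]
  set M := table.foldl (fun nm e => if e > nm then e else nm) 0 with hMdef
  have hM : 0 ≤ M := pvMax_nonneg table
  dsimp only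
  rw [pvMaxD_eq]
  rw [show (PySem.Set.empty : PySem.Set Int) = ([] : List Int) from rfl,
      ← PySem.Set.ofList_eq_foldl]
  set s := PySem.Set.ofList table with hs
  have hnd : s.Nodup := PySem.Set.nodup_ofList table
  rw [pvScan_eq_all]
  rw [Bool.eq_iff_iff]
  simp only [List.all_eq_true, PySem.List.mem_pyRange_one, PySem.Set.contains_iff,
    decide_eq_true_eq]
  constructor
  · intro h
    exact (pvCore s hnd M hM).mp (fun i h0 hi => h i ⟨h0, by omega⟩)
  · intro h i hi
    exact (pvCore s hnd M hM).mpr h i hi.1 (by omega)
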